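-- pv_equiv track=rewrite | github.com/Padraigobrien08/Agentic-GenAI-Capstone-Google-Kaggle | agents/orchestrator.py | _extract_helpful_snippets
-- ===== SOURCE A (Python) =====
-- from typing import List, Optional
--
-- def _extract_helpful_snippets(
--     improved_prompt: str, changes_explained: List[str]
-- ) -> List[str]:
--     """
--     Extract 1-2 short lines from improved_prompt containing strong rules.
--
--     Filters to lines containing strong rules (e.g. "MUST", "NEVER", "refuse", "safety")
--     and returns up to 2 lines, stripped of whitespace.
--
--     Args:
--         improved_prompt: The full improved prompt
--         changes_explained: List of changes that were made (unused, kept for compatibility)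
--
--     Returns:
--         List of 1-2 short, useful prompt snippets with strong rules
--     """
--     snippets = []
--
--     # Split improved_prompt into lines
--     lines = improved_prompt.split("\n")
--
--     # Filter to lines containing strong rules
--     strong_rule_keywords = [
--         "MUST",
--         "NEVER",
--         "refuse",
--         "safety",
--         "must not",
--         "do not",
--         "always",
--         "required",
--         "never",
--         "avoid",
--         "ignore",
--         "don't know",
--         "I don't know",
--     ]
--
--     for line in lines:
--         line = line.strip()
--         # Skip empty lines, very short lines, or very long lines
--         if not line or len(line) < 20 or len(line) > 200:
--             continue
--
--         # Check if line contains strong rule keywords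
--         line_lower = line.lower()
--         if any(keyword.lower() in line_lower for keyword in strong_rule_keywords):
--             snippets.append(line)
--             if len(snippets) >= 2:
--                 break
--
--     # If we didn't find enough strong rule lines, take first substantial lines
--     if len(snippets) < 2:
--         for line in lines:
--             line = line.strip()
--             if line and 20 <= len(line) <= 200 and line not in snippets:
--                 snippets.append(line)
--                 if len(snippets) >= 2:
--                     break
--
--     return snippets[:2]  # Return at most 2 snippets
-- ===== SOURCE B (Python) =====
-- from typing import List
--
-- _KEYWORDS = [
--     "MUST", "NEVER", "refuse", "safety", "must not", "do not", "always",
--     "required", "never", "avoid", "ignore", "don't know", "I don't know",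
-- ]
--
-- def _extract_helpful_snippets(
--     improved_prompt: str, changes_explained: List[str]
-- ) -> List[str]:
--     # ONE pass over the lines keeping two accumulators: rule lines (up to 2,
--     # duplicates allowed, as keyword matches are taken as-is) and fallback
--     # lines (up to 2 distinct non-rule lines). Combine at the end.
--     rules: List[str] = []
--     fills: List[str] = []
--     for raw in improved_prompt.split("\n"):
--         s = raw.strip()
--         if not (20 <= len(s) <= 200):
--             continue
--         low = s.lower()
--         if any(k.lower() in low for k in _KEYWORDS):
--             rules.append(s)
--         elif len(fills) < 2 and s not in fills:
--             fills.append(s)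
--         if len(rules) >= 2:
--             break
--     return (rules + fills)[:2]
-- ===== Notes on version B (the rewrite author's own statement) =====
-- stated objective: alternative
-- what changed: Replaces A's two sequential scans of the lines (first a keyword scan with break, then a top-up scan deduplicating against the growing output) by ONE pass that maintains two separate accumulators - up to 2 keyword 'rule' lines and up to 2 distinct non-rule fallback lines - and concatenates them at the end.
import Mathlib
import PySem

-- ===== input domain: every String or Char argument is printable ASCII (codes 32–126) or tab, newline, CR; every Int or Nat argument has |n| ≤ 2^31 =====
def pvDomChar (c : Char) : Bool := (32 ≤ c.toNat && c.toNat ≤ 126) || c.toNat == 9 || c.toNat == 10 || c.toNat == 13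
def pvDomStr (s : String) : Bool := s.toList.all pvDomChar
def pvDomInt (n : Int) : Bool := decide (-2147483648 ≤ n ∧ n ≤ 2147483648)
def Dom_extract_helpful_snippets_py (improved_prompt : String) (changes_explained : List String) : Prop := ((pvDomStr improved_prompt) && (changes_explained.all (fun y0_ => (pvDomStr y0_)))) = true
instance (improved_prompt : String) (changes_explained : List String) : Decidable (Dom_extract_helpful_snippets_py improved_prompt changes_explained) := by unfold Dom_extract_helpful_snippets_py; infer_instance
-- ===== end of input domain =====

-- B replaces A's two sequential scans (keyword scan with break, then top-up scan deduplicating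
-- against the output) by ONE pass with two accumulators (rule lines / distinct fallback lines),
-- concatenated at the end — objective: alternative (same cost, different algorithm).

-- ===== PORT A =====
def pvKeywords : List String :=
  ["MUST", "NEVER", "refuse", "safety", "must not", "do not", "always",
   "required", "never", "avoid", "ignore", "don't know", "I don't know"]

-- first loop of A: append stripped, length-valid, keyword-matching lines, break at 2
def pvLoopA1 : List String → List String → List String
  | [], snippets => snippets
  | l :: ls, snippets =>
    let line := PySem.Str.strip l
    if line = "" ∨ PySem.Str.len line < 20 ∨ PySem.Str.len line > 200 then
      pvLoopA1 ls snippets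
    else
      let lineLower := PySem.Str.lower line
      if pvKeywords.any (fun k => PySem.Str.isIn (PySem.Str.lower k) lineLower) then
        let snippets' := snippets ++ [line]
        if snippets'.length ≥ 2 then snippets' else pvLoopA1 ls snippets'
      else pvLoopA1 ls snippets

-- second loop of A: top up with substantial lines not already taken, break at 2
def pvLoopA2 : List String → List String → List String
  | [], snippets => snippets
  | l :: ls, snippets =>
    let line := PySem.Str.strip l
    if line ≠ "" ∧ 20 ≤ PySem.Str.len line ∧ PySem.Str.len line ≤ 200 ∧ line ∉ snippets then
      let snippets' := snippets ++ [line]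
      if snippets'.length ≥ 2 then snippets' else pvLoopA2 ls snippets'
    else pvLoopA2 ls snippets

def extract_helpful_snippets_py (improved_prompt : String) (changes_explained : List String) : List String :=
  let lines := (PySem.Str.split? improved_prompt "\n").getD []   -- sep "\n" ≠ "": split? is some
  let snippets := pvLoopA1 lines []
  let snippets := if snippets.length < 2 then pvLoopA2 lines snippets else snippets
  snippets.take 2

-- ===== PORT B =====
-- B's single loop: rules = keyword lines (break at 2), fills = up to 2 distinct non-rule lines
def pvLoopB : List String → List String → List String → List String × List String
  | [], rules, fills => (rules, fills)
  | raw :: ls, rules, fills =>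
    let s := PySem.Str.strip raw
    if ¬ (20 ≤ PySem.Str.len s ∧ PySem.Str.len s ≤ 200) then
      pvLoopB ls rules fills
    else
      let low := PySem.Str.lower s
      if pvKeywords.any (fun k => PySem.Str.isIn (PySem.Str.lower k) low) then
        let rules' := rules ++ [s]
        if rules'.length ≥ 2 then (rules', fills) else pvLoopB ls rules' fills
      else
        let fills' := if fills.length < 2 ∧ s ∉ fills then fills ++ [s] else fills
        if rules.length ≥ 2 then (rules, fills') else pvLoopB ls rules fills'

def extract_helpful_snippets_py_alt (improved_prompt : String) (changes_explained : List String) : List String :=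
  let lines := (PySem.Str.split? improved_prompt "\n").getD []
  let rf := pvLoopB lines [] []
  (rf.1 ++ rf.2).take 2

-- ===== PRECONDITION & SPEC =====
def Spec_extract_helpful_snippets_py (improved_prompt : String) (changes_explained : List String) (out : List String) : Prop := out = extract_helpful_snippets_py_alt improved_prompt changes_explained
instance (improved_prompt : String) (changes_explained : List String) (out : List String) : Decidable (Spec_extract_helpful_snippets_py improved_prompt changes_explained out) := by unfold Spec_extract_helpful_snippets_py; infer_instance

-- ===== CLAIM (what is proved, stated in full; the proofs are below) =====
def Claim_equal_extract_helpful_snippets_py : Prop := ∀ (improved_prompt : String) (changes_explained : List String), Dom_extract_helpful_snippets_py improved_prompt changes_explained → Spec_extract_helpful_snippets_py improved_prompt changes_explained (extract_helpful_snippets_py improved_prompt changes_explained)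

-- ===== LEMMAS AND PROOFS =====

-- proof-level vocabulary
def pvCond (s : String) : Bool :=
  decide (20 ≤ PySem.Str.len s) && decide (PySem.Str.len s ≤ 200)

def pvIsRule (s : String) : Bool :=
  pvKeywords.any (fun k => PySem.Str.isIn (PySem.Str.lower k) (PySem.Str.lower s))

def pvValidOf (ls : List String) : List String :=
  (ls.map PySem.Str.strip).filter pvCond

-- spec of the fill accumulation: first ≤2 distinct elements appended to fills
def pvFill : List String → List String → List String
  | fills, [] => fills
  | fills, s :: ss =>
    if fills.length < 2 ∧ s ∉ fills then pvFill (fills ++ [s]) ss else pvFill fills ss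

lemma pvValidOf_cons (l : String) (ls : List String) :
    pvValidOf (l :: ls) =
      if pvCond (PySem.Str.strip l) then PySem.Str.strip l :: pvValidOf ls else pvValidOf ls := by
  simp [pvValidOf, List.filter_cons]

-- A's skip condition is the negation of the length filter (20 ≤ len rules out "")
lemma pvSkip_iff (s : String) :
    (s = "" ∨ PySem.Str.len s < 20 ∨ PySem.Str.len s > 200) ↔ pvCond s = false := by
  simp only [pvCond, Bool.and_eq_false_iff, decide_eq_false_iff_not, not_le]
  constructor
  · rintro (h | h | h)
    · subst h; left; simp [PySem.Str.len]
    · left; omega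
    · right; omega
  · rintro (h | h)
    · right; left; omega
    · right; right; omega

lemma pvFill_append (fills ns : List String) : ∃ t, pvFill fills ns = fills ++ t := by
  induction ns generalizing fills with
  | nil => exact ⟨[], by simp [pvFill]⟩
  | cons s ss ih =>
    simp only [pvFill]
    split_ifs with h
    · obtain ⟨t, ht⟩ := ih (fills ++ [s])
      exact ⟨s :: t, by simp [ht]⟩
    · exact ih fills

-- B's loop, under take 2, computes: first-2 rule lines then deduped fills
lemma pvLoopB_eq (ls rules fills : List String) (h : rules.length < 2) :
    ((pvLoopB ls rules fills).1 ++ (pvLoopB ls rules fills).2).take 2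
      = ((rules ++ (pvValidOf ls).filter pvIsRule).take 2
          ++ pvFill fills ((pvValidOf ls).filter (fun s => !pvIsRule s))).take 2 := by
  induction ls generalizing rules fills with
  | nil =>
    simp [pvLoopB, pvValidOf, pvFill, List.take_of_length_le (by omega : rules.length ≤ 2)]
  | cons raw ls ih =>
    simp only [pvLoopB]
    rw [pvValidOf_cons]
    by_cases hv : pvCond (PySem.Str.strip raw) = true
    · have hlen : 20 ≤ PySem.Str.len (PySem.Str.strip raw) ∧
          PySem.Str.len (PySem.Str.strip raw) ≤ 200 := by simpa [pvCond] using hv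
      rw [if_neg (by simpa using hlen), if_pos hv]
      by_cases hm : pvIsRule (PySem.Str.strip raw) = true
      · have hm' : (pvKeywords.any fun k =>
            PySem.Str.isIn (PySem.Str.lower k) (PySem.Str.lower (PySem.Str.strip raw))) = true := hm
        rw [if_pos hm']
        rw [List.filter_cons_of_pos hm, List.filter_cons_of_neg (by simp [hm])]
        by_cases h2 : (rules ++ [PySem.Str.strip raw]).length ≥ 2
        · rw [if_pos h2]
          have hlen2 : (rules ++ [PySem.Str.strip raw]).length = 2 := by simp at h2 ⊢; omega
          obtain ⟨t, ht⟩ := pvFill_append fills ((pvValidOf ls).filter (fun s => !pvIsRule s))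
          rw [ht, show rules ++ PySem.Str.strip raw :: ((pvValidOf ls).filter pvIsRule) =
              (rules ++ [PySem.Str.strip raw]) ++ ((pvValidOf ls).filter pvIsRule) by simp]
          simp only [List.take_left' hlen2]
        · rw [if_neg h2, ih _ _ (by simp at h2 ⊢; omega)]
          simp
      · have hm' : ¬ (pvKeywords.any fun k =>
            PySem.Str.isIn (PySem.Str.lower k) (PySem.Str.lower (PySem.Str.strip raw))) = true := hm
        rw [if_neg hm', if_neg (by omega : ¬ rules.length ≥ 2)]
        rw [List.filter_cons_of_neg (by simpa using hm),
          List.filter_cons_of_pos (by simp [Bool.eq_false_iff.mpr hm])]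
        have hstep : pvFill fills
            (PySem.Str.strip raw :: ((pvValidOf ls).filter (fun s => !pvIsRule s)))
            = pvFill (if fills.length < 2 ∧ PySem.Str.strip raw ∉ fills
                then fills ++ [PySem.Str.strip raw] else fills)
              ((pvValidOf ls).filter (fun s => !pvIsRule s)) := by
          by_cases hc : fills.length < 2 ∧ PySem.Str.strip raw ∉ fills
          · rw [if_pos hc]; simp only [pvFill]; rw [if_pos hc]
          · rw [if_neg hc]; simp only [pvFill]; rw [if_neg hc]
        rw [hstep, ih _ _ h]
    · rw [if_pos (show ¬ (20 ≤ PySem.Str.len (PySem.Str.strip raw) ∧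
          PySem.Str.len (PySem.Str.strip raw) ≤ 200) from
          fun hc => hv (by unfold pvCond; rw [decide_eq_true hc.1, decide_eq_true hc.2]; rfl)), if_neg hv]
      exact ih _ _ h

-- A's second loop, starting from rule lines rules0 that already cover every rule line of ls,
-- performs exactly the deduped fill accumulation (under take 2)
lemma pvLoopA2_eq (ls : List String) (rules0 fills : List String)
    (h : (rules0 ++ fills).length < 2)
    (hR : ∀ s, pvIsRule s = true → s ∈ pvValidOf ls → s ∈ rules0)
    (hr0 : ∀ s ∈ rules0, pvIsRule s = true)
    (hf : ∀ s ∈ fills, pvIsRule s = false) :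
    (pvLoopA2 ls (rules0 ++ fills)).take 2
      = (rules0 ++ pvFill fills ((pvValidOf ls).filter (fun s => !pvIsRule s))).take 2 := by
  induction ls generalizing fills with
  | nil =>
    simp [pvLoopA2, pvValidOf, pvFill]
  | cons raw ls ih =>
    simp only [pvLoopA2]
    rw [pvValidOf_cons]
    by_cases hv : pvCond (PySem.Str.strip raw) = true
    · have hlen : 20 ≤ PySem.Str.len (PySem.Str.strip raw) ∧
          PySem.Str.len (PySem.Str.strip raw) ≤ 200 := by simpa [pvCond] using hv
      have hne : PySem.Str.strip raw ≠ "" := by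
        intro he; rw [he] at hv; exact absurd hv (by decide)
      rw [if_pos hv]
      by_cases hm : pvIsRule (PySem.Str.strip raw) = true
      · have hmem : PySem.Str.strip raw ∈ rules0 :=
          hR _ hm (by rw [pvValidOf_cons, if_pos hv]; exact List.mem_cons_self)
        rw [if_neg (fun hc => hc.2.2.2 (List.mem_append_left _ hmem)),
          List.filter_cons_of_neg (by simpa using hm)]
        exact ih _ h (fun s hs hmem' => hR s hs (by rw [pvValidOf_cons, if_pos hv]; exact List.mem_cons_of_mem _ hmem')) hf
      · have hm' : pvIsRule (PySem.Str.strip raw) = false := Bool.eq_false_iff.mpr hm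
        rw [List.filter_cons_of_pos (by simp [hm'])]
        have hnr0 : PySem.Str.strip raw ∉ rules0 :=
          fun hc => absurd (hr0 _ hc) (by simp [hm'])
        by_cases hfm : PySem.Str.strip raw ∈ fills
        · rw [if_neg (fun hc => hc.2.2.2 (List.mem_append_right _ hfm))]
          have : pvFill fills (PySem.Str.strip raw :: (pvValidOf ls).filter (fun s => !pvIsRule s))
              = pvFill fills ((pvValidOf ls).filter (fun s => !pvIsRule s)) := by
            simp only [pvFill]; rw [if_neg (fun hc => hc.2 hfm)]
          rw [this]
          exact ih _ h (fun s hs hmem' => hR s hs (by rw [pvValidOf_cons, if_pos hv]; exact List.mem_cons_of_mem _ hmem')) hf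
        · have hnm : PySem.Str.strip raw ∉ rules0 ++ fills := by
            simp [hnr0, hfm]
          rw [if_pos ⟨hne, hlen.1, hlen.2, hnm⟩]
          have hfl : fills.length < 2 := by simp at h; omega
          have hstep : pvFill fills (PySem.Str.strip raw :: (pvValidOf ls).filter (fun s => !pvIsRule s))
              = pvFill (fills ++ [PySem.Str.strip raw]) ((pvValidOf ls).filter (fun s => !pvIsRule s)) := by
            simp only [pvFill]; rw [if_pos ⟨hfl, hfm⟩]
          rw [hstep]
          by_cases h2 : ((rules0 ++ fills) ++ [PySem.Str.strip raw]).length ≥ 2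
          · rw [if_pos h2]
            have hlen2 : ((rules0 ++ fills) ++ [PySem.Str.strip raw]).length = 2 := by
              simp at h h2 ⊢; omega
            obtain ⟨t, ht⟩ := pvFill_append (fills ++ [PySem.Str.strip raw])
              ((pvValidOf ls).filter (fun s => !pvIsRule s))
            rw [ht, List.take_of_length_le (le_of_eq hlen2),
              show rules0 ++ (fills ++ [PySem.Str.strip raw] ++ t)
                = ((rules0 ++ fills) ++ [PySem.Str.strip raw]) ++ t by simp,
              List.take_left' hlen2]
          · rw [if_neg h2,
              show (rules0 ++ fills) ++ [PySem.Str.strip raw] = rules0 ++ (fills ++ [PySem.Str.strip raw]) by simp]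
            exact ih _ (by simp at h2 ⊢; omega)
              (fun s hs hmem' => hR s hs (by rw [pvValidOf_cons, if_pos hv]; exact List.mem_cons_of_mem _ hmem'))
              (by intro s hs
                  rcases List.mem_append.mp hs with h' | h'
                  · exact hf s h'
                  · simp at h'; subst h'; exact hm')
    · rw [if_neg hv, if_neg (fun hc => by
        have := (pvSkip_iff (PySem.Str.strip raw)).mpr (by simpa using hv)
        rcases this with h1 | h1 | h1
        · exact hc.1 h1
        · omega
        · omega)]
      exact ih _ h (fun s hs hmem' => hR s hs (by rw [pvValidOf_cons, if_neg hv]; exact hmem')) hf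

-- A's first loop takes the first two rule lines (from the previous analysis)
lemma pvLoopA1_eq (ls : List String) (acc : List String) (h : acc.length < 2) :
    pvLoopA1 ls acc = (acc ++ (pvValidOf ls).filter pvIsRule).take 2 := by
  induction ls generalizing acc with
  | nil =>
    simp [pvLoopA1, pvValidOf, List.take_of_length_le (by omega : acc.length ≤ 2)]
  | cons l ls ih =>
    simp only [pvLoopA1]
    rw [pvValidOf_cons]
    by_cases hv : pvCond (PySem.Str.strip l) = true
    · rw [if_neg (fun hs => by simp [(pvSkip_iff _).mp hs] at hv), if_pos hv, List.filter_cons]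
      by_cases hm : pvIsRule (PySem.Str.strip l) = true
      · rw [if_pos hm]
        have hm' : (pvKeywords.any fun k =>
            PySem.Str.isIn (PySem.Str.lower k) (PySem.Str.lower (PySem.Str.strip l))) = true := hm
        rw [if_pos hm']
        by_cases h2 : (acc ++ [PySem.Str.strip l]).length ≥ 2
        · rw [if_pos h2]
          have hlen : (acc ++ [PySem.Str.strip l]).length = 2 := by
            simp at h2 ⊢; omega
          rw [show acc ++ PySem.Str.strip l :: ((pvValidOf ls).filter pvIsRule) =
              (acc ++ [PySem.Str.strip l]) ++ ((pvValidOf ls).filter pvIsRule) by simp,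
            List.take_left' hlen]
        · rw [if_neg h2, ih _ (by simp at h2 ⊢; omega)]
          simp
      · have hm' : ¬ (pvKeywords.any fun k =>
            PySem.Str.isIn (PySem.Str.lower k) (PySem.Str.lower (PySem.Str.strip l))) = true := hm
        rw [if_neg hm', if_neg hm]
        exact ih _ h
    · rw [if_pos ((pvSkip_iff _).mpr (by simpa using hv)), if_neg hv]
      exact ih _ h

-- ===== VERDICT (by name: the statement is the Claim_ definition above) =====
theorem extract_helpful_snippets_py_spec : Claim_equal_extract_helpful_snippets_py := by
  intro p ce _
  show extract_helpful_snippets_py p ce = extract_helpful_snippets_py_alt p ce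
  unfold extract_helpful_snippets_py extract_helpful_snippets_py_alt
  set lines := (PySem.Str.split? p "\n").getD [] with hlines
  have h1 : pvLoopA1 lines [] = ((pvValidOf lines).filter pvIsRule).take 2 := by
    simpa using pvLoopA1_eq lines [] (by simp)
  have hB : ((pvLoopB lines [] []).1 ++ (pvLoopB lines [] []).2).take 2
      = (((pvValidOf lines).filter pvIsRule).take 2
          ++ pvFill [] ((pvValidOf lines).filter (fun s => !pvIsRule s))).take 2 := by
    simpa using pvLoopB_eq lines [] [] (by simp)
  show (List.take 2 (if (pvLoopA1 lines []).length < 2 then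
      pvLoopA2 lines (pvLoopA1 lines []) else pvLoopA1 lines []))
    = ((pvLoopB lines [] []).1 ++ (pvLoopB lines [] []).2).take 2
  rw [hB, h1]
  by_cases h2 : (((pvValidOf lines).filter pvIsRule).take 2).length < 2
  · rw [if_pos h2]
    have hr : ((pvValidOf lines).filter pvIsRule).length < 2 := by
      rw [List.length_take] at h2; omega
    have hfull : ((pvValidOf lines).filter pvIsRule).take 2 = (pvValidOf lines).filter pvIsRule :=
      List.take_of_length_le (by omega)
    rw [hfull]
    have := pvLoopA2_eq lines ((pvValidOf lines).filter pvIsRule) [] (by simpa using hr)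
      (fun s hs hmem => List.mem_filter.mpr ⟨hmem, hs⟩)
      (fun s hs => (List.mem_filter.mp hs).2)
      (by simp)
    simpa using this
  · rw [if_neg h2]
    have hlen2 : (((pvValidOf lines).filter pvIsRule).take 2).length = 2 := by
      rw [List.length_take] at h2 ⊢; omega
    obtain ⟨t, ht⟩ := pvFill_append ([] : List String)
      ((pvValidOf lines).filter (fun s => !pvIsRule s))
    rw [ht]; simp only [List.nil_append]
    rw [List.take_left' hlen2, List.take_of_length_le (le_of_eq hlen2)]
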